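-- pv_equiv track=rewrite | github.com/EdgeLake/EdgeLake | edge_lake/generic/utils_print.py | is_formated_number
-- ===== SOURCE A (Python) =====
-- def is_formated_number(col_data):
--     with_number = False
--     for char in col_data:
--         if char >= '0' and char <= '9':
--             with_number = True
--         elif char == '-':
--             if with_number:
--                 return False        # - sign needs to be once before the nuber itself
--             with_number = True
--         elif char != '.' and char != ',':
--             return False            # Ignored
--     return True
-- ===== SOURCE B (Python) =====
-- def is_formated_number(col_data):
--     # accepted language is exactly: [.,]* -? [0-9.,]*
--     rest = col_data.lstrip('.,')
--     if rest.startswith('-'):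
--         rest = rest[1:]
--     return all(c in '0123456789.,' for c in rest)
-- ===== Notes on version B (the rewrite author's own statement) =====
-- stated objective: idiomatic
-- what changed: Replaces the flag-carrying state-machine scan with the declarative form of the accepted language (leading separators, one optional minus sign, then digits or separators): strip the leading separators, drop an optional minus sign, and check the remainder in one declarative pass.
import Mathlib
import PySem

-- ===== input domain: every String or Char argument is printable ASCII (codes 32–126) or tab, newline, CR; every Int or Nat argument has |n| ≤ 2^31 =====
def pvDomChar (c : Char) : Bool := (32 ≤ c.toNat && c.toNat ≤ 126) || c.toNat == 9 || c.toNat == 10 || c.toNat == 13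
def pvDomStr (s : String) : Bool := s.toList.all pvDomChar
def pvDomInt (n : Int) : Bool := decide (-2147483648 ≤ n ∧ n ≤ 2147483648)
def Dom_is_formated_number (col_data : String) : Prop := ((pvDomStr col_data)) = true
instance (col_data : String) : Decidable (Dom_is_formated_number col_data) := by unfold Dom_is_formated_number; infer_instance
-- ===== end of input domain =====

-- B replaces A's explicit flag-carrying scan by the declarative form of the accepted
-- language ([.,]* -? [0-9.,]*): strip leading '.'/',', drop one optional '-', check the rest.

-- ===== PORT A =====
-- literal port of A's loop: state `with_number`, early returns become the `false` results
def isFormatedLoop (with_number : Bool) : List Char → Bool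
  | [] => true
  | c :: cs =>
    if '0' ≤ c ∧ c ≤ '9' then isFormatedLoop true cs
    else if c = '-' then
      (if with_number then false else isFormatedLoop true cs)
    else if c ≠ '.' ∧ c ≠ ',' then false
    else isFormatedLoop with_number cs

def is_formated_number (col_data : String) : Bool :=
  isFormatedLoop false col_data.toList

-- ===== PORT B =====
-- c in '0123456789.,'
def isTailChar (c : Char) : Bool := ('0' ≤ c && c ≤ '9') || c = '.' || c = ','

def is_formated_number_alt (col_data : String) : Bool :=
  let rest := col_data.toList.dropWhile (fun c => c = '.' || c = ',')
  let rest2 := if rest.head? = some '-' then rest.tail else rest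
  rest2.all isTailChar

-- ===== PRECONDITION & SPEC =====
def Spec_is_formated_number (col_data : String) (out : Bool) : Prop := out = is_formated_number_alt col_data
instance (col_data : String) (out : Bool) : Decidable (Spec_is_formated_number col_data out) := by unfold Spec_is_formated_number; infer_instance

-- ===== CLAIM (what is proved, stated in full; the proofs are below) =====
def Claim_equal_is_formated_number : Prop := ∀ (col_data : String), Dom_is_formated_number col_data → Spec_is_formated_number col_data (is_formated_number col_data)

-- ===== LEMMAS AND PROOFS =====

-- once the flag is set, A just checks that every remaining char is a tail char
theorem loop_true_all (cs : List Char) : isFormatedLoop true cs = cs.all isTailChar := by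
  induction cs with
  | nil => rfl
  | cons c cs ih =>
    simp only [isFormatedLoop, List.all_cons, isTailChar, ih]
    by_cases h1 : '0' ≤ c ∧ c ≤ '9'
    · simp [h1.1, h1.2]
    · by_cases h2 : c = '-'
      · simp [h2]
      · by_cases h3 : c = '.'
        · simp [h1, h2, h3]
        · by_cases h4 : c = ','
          · simp [h1, h2, h3, h4]
          · simp [h1, h2, h3, h4]


theorem loop_false_alt (cs : List Char) :
    isFormatedLoop false cs =
      (let rest := cs.dropWhile (fun c => c = '.' || c = ',')
       let rest2 := if rest.head? = some '-' then rest.tail else rest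
       rest2.all isTailChar) := by
  induction cs with
  | nil => rfl
  | cons c cs ih =>
    by_cases h3 : c = '.' <;> by_cases h4 : c = ','
    · subst h3; exact absurd h4 (by decide)
    · -- c = '.': loop keeps flag false, dropWhile consumes c
      subst h3
      simpa [isFormatedLoop, List.dropWhile] using ih
    · subst h4
      simpa [isFormatedLoop, List.dropWhile] using ih
    · -- c not a separator: dropWhile stops here
      have hdw : (c :: cs).dropWhile (fun c => c = '.' || c = ',') = c :: cs := by
        simp [List.dropWhile, h3, h4]
      by_cases h1 : '0' ≤ c ∧ c ≤ '9'
      · have hm : c ≠ '-' := by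
          rintro rfl; exact absurd h1.1 (by decide)
        simp [isFormatedLoop, h1, hdw, hm, loop_true_all, isTailChar, h1.1, h1.2]
      · by_cases h2 : c = '-'
        · subst h2
          simp [isFormatedLoop, hdw, loop_true_all]
        · have : ¬ isTailChar c = true := by
            simp [isTailChar, h2, h3, h4]
            intro hle; exact not_le.mp (fun hge => h1 ⟨hle, hge⟩)
          simp [isFormatedLoop, h1, h2, h3, h4, hdw, this]

-- ===== VERDICT (by name: the statement is the Claim_ definition above) =====
theorem is_formated_number_spec : Claim_equal_is_formated_number := by
  intro col_data _
  unfold Spec_is_formated_number is_formated_number is_formated_number_alt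
  exact loop_false_alt col_data.toList
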